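-- pv_equiv track=rewrite | github.com/SlavaRejik/working_with_moodle | Moodle_keyboard_course/Generate_questions.py | first_step
-- ===== SOURCE A (Python) =====
-- def first_step(my_line):
--     out_list = []
--     x = 3
--     y = 6
--     out_line = ''
--     while x > -1 or y < len(my_line):
--         if x > -1:
--             out_line = '{0}{1}'.format(my_line[x], out_line)
--             x -= 1
--         if y < len(my_line):
--             out_line = '{0}{1}'.format(out_line, my_line[y])
--             y += 1
--         out_list.append(out_line)
--     out_list.append('{0}{1}'.format(my_line[0:5], my_line[6:len(my_line)]))
--     out_list.append(my_line)
--     return out_list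
-- ===== SOURCE B (Python) =====
-- def first_step(my_line):
--     n = len(my_line)
--     N = max(4, n - 6)
--     out = [my_line[max(0, 4 - k):4] + my_line[6:6 + k] for k in range(1, N + 1)]
--     out.append(my_line[0:5] + my_line[6:n])
--     out.append(my_line)
--     return out
-- ===== Notes on version B (the rewrite author's own statement) =====
-- stated objective: simpler
-- what changed: Replaces A's stateful while-loop (two counters and a growing out_line accumulator) by a closed-form list comprehension that computes each snapshot directly as my_line[max(0,4-k):4] + my_line[6:6+k] for k in 1..max(4,len-6).
import Mathlib
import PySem

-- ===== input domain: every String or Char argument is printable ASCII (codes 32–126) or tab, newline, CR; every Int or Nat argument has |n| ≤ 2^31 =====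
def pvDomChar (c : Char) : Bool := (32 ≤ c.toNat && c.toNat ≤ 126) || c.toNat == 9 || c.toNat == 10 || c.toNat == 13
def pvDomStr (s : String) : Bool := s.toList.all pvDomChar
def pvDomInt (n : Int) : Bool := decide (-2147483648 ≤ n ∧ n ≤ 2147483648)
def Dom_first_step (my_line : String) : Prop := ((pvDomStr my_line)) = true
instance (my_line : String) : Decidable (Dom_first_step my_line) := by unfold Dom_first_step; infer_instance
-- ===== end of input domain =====

-- B replaces A's stateful while-loop accumulator by a closed-form slice expression for each
-- snapshot (simpler decomposition, same asymptotic cost).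

-- ===== PORT A =====
-- literal port of A's while-loop: x counts down from 3 (prefix chars prepended),
-- y counts up from 6 (suffix chars appended), a snapshot of out_line is appended each turn.
-- my_line[x] / my_line[y] are PySem.List.pyGet?; the 'none' (IndexError) arm is unreachable
-- under Pre_first_step and performs no prepend/append.
-- one loop body: prepend my_line[x] when x > -1, then append my_line[y] when y < len
def stepOut (s : List Char) (x y : Int) (out : List Char) : List Char :=
  let out1 := if x > -1 then
      (match PySem.List.pyGet? s x with
       | some c => c :: out
       | none => out)
    else out
  if y < (s.length : Int) then
    (match PySem.List.pyGet? s y with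
     | some c => out1 ++ [c]
     | none => out1)
  else out1

def firstStepLoop (s : List Char) (x y : Int) (out : List Char) (acc : List String) :
    List String :=
  if _h : x > -1 ∨ y < (s.length : Int) then
    firstStepLoop s (if x > -1 then x - 1 else x) (if y < (s.length : Int) then y + 1 else y)
      (stepOut s x y out) (acc ++ [String.ofList (stepOut s x y out)])
  else acc
termination_by ((x + 1).toNat + ((s.length : Int) - y).toNat)
decreasing_by split_ifs with h1 h2 h2 <;> omega

def first_step (my_line : String) : List String :=
  let s := my_line.toList
  firstStepLoop s 3 6 [] []
    ++ [String.ofList (PySem.List.slice s (some 0) (some 5)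
          ++ PySem.List.slice s (some 6) (some (s.length : Int))),
        my_line]

-- ===== PORT B =====
-- literal port of Source B: each snapshot k ∈ 1..max(4, n-6) is my_line[max(0,4-k):4] + my_line[6:6+k].
def first_step_alt (my_line : String) : List String :=
  let s := my_line.toList
  let n : Int := s.length
  let N : Int := max 4 (n - 6)
  (PySem.List.pyRange 1 (N + 1) 1).map (fun k =>
      String.ofList (PySem.List.slice s (some (max 0 (4 - k))) (some 4)
        ++ PySem.List.slice s (some 6) (some (6 + k))))
    ++ [String.ofList (PySem.List.slice s (some 0) (some 5)
          ++ PySem.List.slice s (some 6) (some n)),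
        my_line]

-- ===== PRECONDITION & SPEC =====
-- A raises IndexError (my_line[3]) on strings shorter than 4 characters; exactly those are excluded.
def Pre_first_step (my_line : String) : Prop := 4 ≤ my_line.toList.length
instance (my_line : String) : Decidable (Pre_first_step my_line) := by
  unfold Pre_first_step; infer_instance

def pvWitness_first_step : String := "queso"

def Spec_first_step (my_line : String) (out : List String) : Prop := out = first_step_alt my_line
instance (my_line : String) (out : List String) : Decidable (Spec_first_step my_line out) := by
  unfold Spec_first_step; infer_instance

-- ===== CLAIM (what is proved, stated in full; the proofs are below) =====
def Claim_equal_first_step : Prop := ∀ (my_line : String), Dom_first_step my_line →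
  Pre_first_step my_line → Spec_first_step my_line (first_step my_line)

-- ===== LEMMAS AND PROOFS =====

-- closed form of the out_line after k iterations of A's loop
def snap (s : List Char) (k : Nat) : List Char :=
  (s.drop (4 - k)).take (min k 4) ++ (s.drop 6).take k

lemma snap_zero (s : List Char) : snap s 0 = [] := by simp [snap]

lemma loop_inv (s : List Char) (hn : 4 ≤ s.length) :
    ∀ (d k : Nat) (acc : List String), k + d = max 4 (s.length - 6) →
      firstStepLoop s (max (-1) (3 - (k : Int))) ((6 + min k (s.length - 6) : Nat) : Int)
          (snap s k) acc
        = acc ++ (List.range d).map (fun j => String.ofList (snap s (k + 1 + j))) := by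
  intro d
  induction d with
  | zero =>
    intro k acc hk
    rw [firstStepLoop, dif_neg (by push_cast; omega)]
    simp
  | succ d ih =>
    intro d_k acc hk
    have hkN : d_k < max 4 (s.length - 6) := by omega
    have hcond : max (-1) (3 - (d_k : Int)) > -1 ∨
        ((6 + min d_k (s.length - 6) : Nat) : Int) < (s.length : Int) := by
      by_cases hk4 : d_k < 4
      · left; omega
      · right
        have h1 : d_k < s.length - 6 := by omega
        have h2 : min d_k (s.length - 6) = d_k := by omega
        rw [h2]; push_cast; omega
    rw [firstStepLoop, dif_pos hcond]
    have hstep : stepOut s (max (-1) (3 - (d_k : Int)))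
        ((6 + min d_k (s.length - 6) : Nat) : Int) (snap s d_k) = snap s (d_k + 1) := by
      have hout1 : (if max (-1) (3 - (d_k : Int)) > -1 then
            (match PySem.List.pyGet? s (max (-1) (3 - (d_k : Int))) with
             | some c => c :: snap s d_k
             | none => snap s d_k)
          else snap s d_k)
          = (s.drop (4 - (d_k + 1))).take (min (d_k + 1) 4) ++ (s.drop 6).take d_k := by
        by_cases hk4 : d_k < 4
        · have hmax : max (-1) (3 - (d_k : Int)) = ((3 - d_k : Nat) : Int) := by omega
          have hlt : 3 - d_k < s.length := by omega
          rw [if_pos (by omega), hmax, PySem.List.pyGet?_natCast,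
            List.getElem?_eq_getElem hlt]
          simp only [snap]
          rw [show 4 - (d_k + 1) = 3 - d_k by omega,
            List.drop_eq_getElem_cons hlt,
            show 3 - d_k + 1 = 4 - d_k by omega,
            show min (d_k + 1) 4 = d_k + 1 by omega,
            show min d_k 4 = d_k by omega]
          simp
        · rw [if_neg (by omega)]
          simp only [snap]
          rw [show 4 - (d_k + 1) = 0 by omega, show 4 - d_k = 0 by omega,
            show min (d_k + 1) 4 = 4 by omega, show min d_k 4 = 4 by omega]
      unfold stepOut
      rw [hout1]
      by_cases hkm : d_k < s.length - 6
      · have hmin : min d_k (s.length - 6) = d_k := by omega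
        have hlt : 6 + d_k < s.length := by omega
        rw [hmin, if_pos (by push_cast; omega)]
        rw [show ((6 + d_k : Nat) : Int) = (((6 + d_k : Nat) : Nat) : Int) by norm_num,
          PySem.List.pyGet?_natCast, List.getElem?_eq_getElem hlt]
        simp only [snap]
        have hk' : d_k < (s.drop 6).length := by simp; omega
        rw [List.append_assoc]
        congr 1
        rw [List.take_add_one, List.getElem?_eq_getElem hk']
        simp
      · have hmin : min d_k (s.length - 6) = s.length - 6 := by omega
        rw [hmin, if_neg (by push_cast; omega)]
        simp only [snap]
        congr 1
        rw [List.take_of_length_le (by simp; omega),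
          List.take_of_length_le (by simp; omega)]
    have hx1 : (if max (-1) (3 - (d_k : Int)) > -1 then max (-1) (3 - (d_k : Int)) - 1
        else max (-1) (3 - (d_k : Int))) = max (-1) (3 - ((d_k + 1 : Nat) : Int)) := by
      split_ifs with h <;> (push_cast at *; omega)
    have hy1 : (if ((6 + min d_k (s.length - 6) : Nat) : Int) < (s.length : Int)
          then ((6 + min d_k (s.length - 6) : Nat) : Int) + 1
          else ((6 + min d_k (s.length - 6) : Nat) : Int))
        = ((6 + min (d_k + 1) (s.length - 6) : Nat) : Int) := by
      split_ifs with h <;> (push_cast at *; omega)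
    rw [hstep, hx1, hy1, ih (d_k + 1) (acc ++ [String.ofList (snap s (d_k + 1))]) (by omega)]
    rw [List.range_succ_eq_map]
    simp only [List.map_cons, List.map_map, List.append_assoc, List.cons_append,
      List.nil_append]
    simp only [Nat.add_zero]
    congr 1
    congr 1
    apply List.map_congr_left
    intro j _
    simp only [Function.comp_apply]
    congr 2
    omega

-- B's snapshot expression equals snap
lemma alt_body_eq_snap (s : List Char) (k : Int) (hk : 0 < k) :
    PySem.List.slice s (some (max 0 (4 - k))) (some 4)
      ++ PySem.List.slice s (some 6) (some (6 + k)) = snap s k.toNat := by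
  rw [PySem.List.slice_toNat _ (by omega) (by omega),
    PySem.List.slice_toNat _ (by omega) (by omega)]
  have e1 : (max 0 (4 - k)).toNat = 4 - k.toNat := by omega
  have e2 : (4 : Int).toNat - (max 0 (4 - k)).toNat = min k.toNat 4 := by omega
  have e3 : (6 + k).toNat - (6 : Int).toNat = k.toNat := by omega
  rw [e2, e3, e1]
  simp [snap]

-- ===== VERDICT (by name: the statement is the Claim_ definition above) =====
theorem first_step_spec : Claim_equal_first_step := by
  intro my_line _ hpre
  unfold Spec_first_step first_step first_step_alt
  simp only []
  set s := my_line.toList with hs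
  have hn : 4 ≤ s.length := hpre
  congr 1
  -- loop side via the invariant at k = 0
  have h0 := loop_inv s hn (max 4 (s.length - 6)) 0 [] (by omega)
  rw [snap_zero] at h0
  rw [show max (-1) (3 - ((0 : Nat) : Int)) = (3 : Int) by decide] at h0
  rw [show ((6 + min 0 (s.length - 6) : Nat) : Int) = (6 : Int) by simp] at h0
  rw [h0]
  -- comprehension side
  rw [PySem.List.pyRange_one]
  rw [show ((max 4 ((s.length : Int) - 6) + 1 - 1).toNat) = max 4 (s.length - 6) by omega]
  simp only [List.map_map, List.nil_append]
  apply List.map_congr_left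
  intro j hj
  simp only [Function.comp]
  rw [alt_body_eq_snap s (1 + (j : Int)) (by omega),
    show (1 + (j : Int)).toNat = 0 + 1 + j by omega]
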